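-- pv_equiv track=rewrite | github.com/BrasSqrl/quant_workflow | src/quant_pd_framework/steps/diagnostics.py | _infer_source_feature_name
-- ===== SOURCE A (Python) =====
-- def _infer_source_feature_name(
--
--     feature_name: str,
--     feature_columns: list[str],
-- ) -> str:
--     if feature_name in feature_columns:
--         return feature_name
--     suffix = feature_name.split("__", 1)[-1]
--     if suffix in feature_columns:
--         return suffix
--     for candidate in sorted(feature_columns, key=len, reverse=True):
--         if suffix == candidate or suffix.startswith(f"{candidate}_"):
--             return candidate
--         if feature_name == candidate or feature_name.startswith(f"{candidate}_"):
--             return candidate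
--     return suffix
-- ===== SOURCE B (Python) =====
-- def _infer_source_feature_name(
--     feature_name: str,
--     feature_columns: list[str],
-- ) -> str:
--     if feature_name in feature_columns:
--         return feature_name
--     suffix = feature_name.split("__", 1)[-1]
--     if suffix in feature_columns:
--         return suffix
--     # single pass in original order, keeping the longest matching candidate;
--     # strict '>' keeps the first-seen candidate among equal lengths, which is
--     # exactly what the stable length-descending sort in A returns.
--     best = None
--     for candidate in feature_columns:
--         if (suffix == candidate
--                 or suffix.startswith(candidate + "_")
--                 or feature_name == candidate
--                 or feature_name.startswith(candidate + "_")):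
--             if best is None or len(candidate) > len(best):
--                 best = candidate
--     return best if best is not None else suffix
-- ===== Notes on version B (the rewrite author's own statement) =====
-- stated objective: alternative
-- what changed: Replaced A's sort of all columns by length descending followed by a first-match scan with a single pass over the columns in original order that keeps the longest matching candidate (strict '>' so the earliest among equal lengths wins, matching the stable sort).
import Mathlib
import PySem

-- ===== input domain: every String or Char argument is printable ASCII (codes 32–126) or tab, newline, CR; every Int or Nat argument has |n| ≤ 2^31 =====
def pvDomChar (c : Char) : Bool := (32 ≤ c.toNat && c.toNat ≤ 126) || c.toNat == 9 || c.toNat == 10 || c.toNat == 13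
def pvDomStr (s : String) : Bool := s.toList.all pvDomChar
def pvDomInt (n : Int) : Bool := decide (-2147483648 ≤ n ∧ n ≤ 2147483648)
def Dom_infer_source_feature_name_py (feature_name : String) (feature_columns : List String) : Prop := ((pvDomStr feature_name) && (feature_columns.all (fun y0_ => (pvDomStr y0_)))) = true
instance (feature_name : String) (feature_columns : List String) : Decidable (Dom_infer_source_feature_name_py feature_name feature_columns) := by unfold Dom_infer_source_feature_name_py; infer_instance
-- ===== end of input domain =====

-- B replaces A's sort-then-scan (sorted by length descending, return first match) with a
-- single pass over the columns in original order tracking the longest match (objective: alternative).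

-- ===== PORT A =====
-- suffix = feature_name.split("__", 1)[-1]   (shared line of both Pythons)
def pvSuffix (feature_name : String) : String :=
  (PySem.List.pyGet? ((PySem.Str.splitMax? feature_name "__" 1).getD []) (-1)).getD ""

-- the 'for candidate in sorted(...)' loop of A: return first candidate matching either test
def pvLoopA (suffix feature_name : String) : List String → String
  | [] => suffix
  | c :: rest =>
    if suffix == c || PySem.Str.startswith suffix (c ++ "_") then c
    else if feature_name == c || PySem.Str.startswith feature_name (c ++ "_") then c
    else pvLoopA suffix feature_name rest

def infer_source_feature_name_py (feature_name : String) (feature_columns : List String) : String :=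
  if feature_name ∈ feature_columns then feature_name
  else if pvSuffix feature_name ∈ feature_columns then pvSuffix feature_name
  else pvLoopA (pvSuffix feature_name) feature_name
        (PySem.List.sorted feature_columns (fun s => PySem.Str.len s) true)

-- ===== PORT B =====
-- B's loop: one pass in original order, keep the longest matching candidate (strict '>')
def pvBestLoop (p : String → Bool) : List String → Option String → Option String
  | [], best => best
  | c :: rest, best =>
    pvBestLoop p rest
      (if p c then
        (match best with
         | none => some c
         | some b => if PySem.Str.len b < PySem.Str.len c then some c else some b)
       else best)

def infer_source_feature_name_py_alt (feature_name : String) (feature_columns : List String) : String :=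
  if feature_name ∈ feature_columns then feature_name
  else if pvSuffix feature_name ∈ feature_columns then pvSuffix feature_name
  else
    (pvBestLoop
      (fun c =>
        pvSuffix feature_name == c || PySem.Str.startswith (pvSuffix feature_name) (c ++ "_") ||
        feature_name == c || PySem.Str.startswith feature_name (c ++ "_"))
      feature_columns none).getD (pvSuffix feature_name)

-- ===== PRECONDITION & SPEC =====
def Spec_infer_source_feature_name_py (feature_name : String) (feature_columns : List String) (out : String) : Prop := out = infer_source_feature_name_py_alt feature_name feature_columns
instance (feature_name : String) (feature_columns : List String) (out : String) : Decidable (Spec_infer_source_feature_name_py feature_name feature_columns out) := by unfold Spec_infer_source_feature_name_py; infer_instance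

-- ===== CLAIM (what is proved, stated in full; the proofs are below) =====
def Claim_equal_infer_source_feature_name_py : Prop := ∀ (feature_name : String) (feature_columns : List String), Dom_infer_source_feature_name_py feature_name feature_columns → Spec_infer_source_feature_name_py feature_name feature_columns (infer_source_feature_name_py feature_name feature_columns)

-- ===== LEMMAS AND PROOFS =====

-- A's loop is find-first over the OR of its two tests
theorem pvLoopA_eq (suffix fn : String) (ys : List String) :
    pvLoopA suffix fn ys =
      (ys.find? (fun c =>
        suffix == c || PySem.Str.startswith suffix (c ++ "_") ||
        fn == c || PySem.Str.startswith fn (c ++ "_"))).getD suffix := by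
  induction ys with
  | nil => simp [pvLoopA]
  | cons c ys ih =>
    simp only [pvLoopA, List.find?_cons]
    cases h1 : (suffix == c) <;> cases h2 : PySem.Str.startswith suffix (c ++ "_") <;>
      cases h3 : (fn == c) <;> cases h4 : PySem.Str.startswith fn (c ++ "_") <;>
      simp [h1, h2, h3, h4, ih]

-- one-step unfoldings of PySem.List.insertBy
theorem pvInsertBy_cons_pos (before : String → String → Bool) (x y : String) (ys : List String)
    (h : before x y = true) : PySem.List.insertBy before x (y :: ys) = x :: y :: ys := by
  simp [PySem.List.insertBy, h]

theorem pvInsertBy_cons_neg (before : String → String → Bool) (x y : String) (ys : List String)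
    (h : before x y = false) :
    PySem.List.insertBy before x (y :: ys) = y :: PySem.List.insertBy before x ys := by
  simp [PySem.List.insertBy, h]

-- inserting into a length-descending list preserves the descending order
theorem pvInsert_pairwise (x : String) (acc : List String)
    (h : acc.Pairwise (fun a b => PySem.Str.len b ≤ PySem.Str.len a)) :
    (PySem.List.insertBy (fun a b => decide (PySem.Str.len b < PySem.Str.len a)) x acc).Pairwise
      (fun a b => PySem.Str.len b ≤ PySem.Str.len a) := by
  induction acc with
  | nil => simp [PySem.List.insertBy]
  | cons y ys ih =>
    rcases List.pairwise_cons.mp h with ⟨hy, hys⟩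
    by_cases hxy : PySem.Str.len y < PySem.Str.len x
    · have hins : PySem.List.insertBy (fun a b => decide (PySem.Str.len b < PySem.Str.len a)) x (y :: ys)
          = x :: y :: ys := pvInsertBy_cons_pos _ _ _ _ (decide_eq_true hxy)
      rw [hins]
      refine List.pairwise_cons.mpr ⟨?_, h⟩
      intro z hz
      rcases List.mem_cons.mp hz with rfl | hz'
      · exact le_of_lt hxy
      · exact le_trans (hy z hz') (le_of_lt hxy)
    · have hins : PySem.List.insertBy (fun a b => decide (PySem.Str.len b < PySem.Str.len a)) x (y :: ys)
          = y :: PySem.List.insertBy (fun a b => decide (PySem.Str.len b < PySem.Str.len a)) x ys :=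
        pvInsertBy_cons_neg _ _ _ _ (decide_eq_false hxy)
      rw [hins]
      refine List.pairwise_cons.mpr ⟨?_, ih hys⟩
      intro z hz
      rcases (PySem.List.mem_insertBy _ _ _ _).mp hz with rfl | hz'
      · omega
      · exact hy z hz'

-- effect of one stable descending insertion on find-first
theorem pvInsert_find (p : String → Bool) (x : String) :
    ∀ acc : List String,
      acc.Pairwise (fun a b => PySem.Str.len b ≤ PySem.Str.len a) →
      (PySem.List.insertBy (fun a b => decide (PySem.Str.len b < PySem.Str.len a)) x acc).find? p =
        (if p x then
          (match acc.find? p with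
           | none => some x
           | some b => if PySem.Str.len b < PySem.Str.len x then some x else some b)
         else acc.find? p) := by
  intro acc
  induction acc with
  | nil =>
    intro _
    cases hx : p x <;> simp [PySem.List.insertBy, List.find?, hx]
  | cons y ys ih =>
    intro h
    rcases List.pairwise_cons.mp h with ⟨hy, hys⟩
    by_cases hxy : PySem.Str.len y < PySem.Str.len x
    · have hins : PySem.List.insertBy (fun a b => decide (PySem.Str.len b < PySem.Str.len a)) x (y :: ys)
          = x :: y :: ys := pvInsertBy_cons_pos _ _ _ _ (decide_eq_true hxy)
      rw [hins]
      cases hx : p x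
      · rw [List.find?_cons_of_neg (by simp [hx]), if_neg (by simp)]
      · rw [List.find?_cons_of_pos hx, if_pos rfl]
        cases hfy : (y :: ys).find? p with
        | none => rfl
        | some b =>
          have hb := List.mem_of_find?_eq_some hfy
          have hble : PySem.Str.len b ≤ PySem.Str.len y := by
            rcases List.mem_cons.mp hb with rfl | hb'
            · exact le_refl _
            · exact hy b hb'
          exact (if_pos (lt_of_le_of_lt hble hxy)).symm
    · have hins : PySem.List.insertBy (fun a b => decide (PySem.Str.len b < PySem.Str.len a)) x (y :: ys)
          = y :: PySem.List.insertBy (fun a b => decide (PySem.Str.len b < PySem.Str.len a)) x ys :=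
        pvInsertBy_cons_neg _ _ _ _ (decide_eq_false hxy)
      rw [hins]
      cases hpy : p y
      · rw [List.find?_cons_of_neg (by simp [hpy]), List.find?_cons_of_neg (by simp [hpy])]
        exact ih hys
      · rw [List.find?_cons_of_pos hpy, List.find?_cons_of_pos hpy]
        cases hx : p x
        · simp
        · exact (if_neg hxy).symm

-- folding A's insertion sort step = B's running-best loop, on the find-first level
theorem pvFold_find (p : String → Bool) :
    ∀ (xs acc : List String),
      acc.Pairwise (fun a b => PySem.Str.len b ≤ PySem.Str.len a) →
      ((xs.foldl (fun acc x =>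
          PySem.List.insertBy (fun a b => decide (PySem.Str.len b < PySem.Str.len a)) x acc) acc).find? p)
        = pvBestLoop p xs (acc.find? p) := by
  intro xs
  induction xs with
  | nil => intro acc _; simp [pvBestLoop]
  | cons x xs ih =>
    intro acc h
    simp only [List.foldl_cons, pvBestLoop]
    rw [ih _ (pvInsert_pairwise x acc h), pvInsert_find p x acc h]

-- find-first over the length-descending stable sort = B's running-best loop
theorem pvSorted_find (p : String → Bool) (xs : List String) :
    ((PySem.List.sorted xs (fun s => PySem.Str.len s) true).find? p) = pvBestLoop p xs none := by
  rw [PySem.List.sorted_rev_eq_foldl_insertBy]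
  simpa using pvFold_find p xs [] (by simp)

-- ===== VERDICT (by name: the statement is the Claim_ definition above) =====
theorem infer_source_feature_name_py_spec : Claim_equal_infer_source_feature_name_py := by
  intro fn cols _
  unfold Spec_infer_source_feature_name_py infer_source_feature_name_py infer_source_feature_name_py_alt
  by_cases hmem : fn ∈ cols
  · simp [hmem]
  · by_cases hsuf : pvSuffix fn ∈ cols
    · simp [hmem, hsuf]
    · simp only [if_neg hmem, if_neg hsuf]
      rw [pvLoopA_eq, pvSorted_find]
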